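-- pv_equiv track=rewrite | github.com/diegoCBorba/algoritmos-e-programacao | Atividades 1° Período/9° Recursividade/Soma de Fatoriais.py | soma_fatoriais
-- ===== SOURCE A (Python) =====
-- def fatorial(num):
--     if num == 0:
--         return 1
--     return num * fatorial(num - 1)
--
-- def eh_divisor_3(num):
--     return num % 3 == 0
--
-- def soma_fatoriais(num):
--     if num == []:
--         return 0
--     if eh_divisor_3(num[0]):
--         x = fatorial(num[0])
--         num.pop(0)
--         return x + soma_fatoriais(num)
--     num.pop(0)
--     return soma_fatoriais(num)
-- ===== SOURCE B (Python) =====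
-- def fatorial(num):
--     # iterative factorial: product accumulator over 2..num
--     f = 1
--     for i in range(2, num + 1):
--         f *= i
--     return f
--
-- def eh_divisor_3(num):
--     return num % 3 == 0
--
-- def soma_fatoriais(num):
--     # iterative loop with accumulator; empties the list like A (same mutation)
--     total = 0
--     while num:
--         x = num.pop(0)
--         if eh_divisor_3(x):
--             total += fatorial(x)
--     return total
-- ===== Notes on version B (the rewrite author's own statement) =====
-- stated objective: simpler
-- what changed: Replaced the doubly recursive A (recursion over the list plus a recursive factorial) by a single iterative while-loop with an accumulator and an inline iterative factorial; the list is still emptied via pop(0) so the mutation side effect is preserved.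
import Mathlib
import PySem

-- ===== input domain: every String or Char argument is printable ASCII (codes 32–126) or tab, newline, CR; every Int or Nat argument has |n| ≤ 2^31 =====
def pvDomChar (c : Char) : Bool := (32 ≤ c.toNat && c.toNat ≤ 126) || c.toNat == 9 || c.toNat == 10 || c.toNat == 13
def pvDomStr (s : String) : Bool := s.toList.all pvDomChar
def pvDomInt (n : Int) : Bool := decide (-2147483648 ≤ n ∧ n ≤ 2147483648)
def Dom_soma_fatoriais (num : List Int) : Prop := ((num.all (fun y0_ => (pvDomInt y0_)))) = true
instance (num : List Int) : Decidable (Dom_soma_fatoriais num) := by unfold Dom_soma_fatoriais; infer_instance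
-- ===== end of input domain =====

-- B replaces A's double recursion (list recursion + recursive factorial) by one iterative
-- accumulator loop with an inline iterative factorial (objective: simpler). Equivalence is about
-- the return value; both Pythons additionally empty the argument list in place via pop(0).


-- ===== PORT A =====
-- fatorial: recursive; Python diverges (RecursionError) for num < 0 — the 'n < 0 → 1' branch is a
-- totality guard only, those inputs are outside Pre_.
def pvFatA (n : Int) : Int :=
  if n = 0 then 1
  else if n < 0 then 1
  else n * pvFatA (n - 1)
termination_by n.toNat
decreasing_by omega

def pvEhDivisor3 (n : Int) : Bool := PySem.Int.mod n 3 == 0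

def soma_fatoriais (num : List Int) : Int :=
  match num with
  | [] => 0
  | x :: rest =>
    if pvEhDivisor3 x then pvFatA x + soma_fatoriais rest
    else soma_fatoriais rest

-- ===== PORT B =====
-- iterative factorial: f = 1; for i in range(2, num+1): f *= i
def pvFatB (n : Int) : Int :=
  (PySem.List.pyRange 2 (n + 1) 1).foldl (fun f i => f * i) 1

-- while num: x = num.pop(0); if eh_divisor_3(x): total += fatorial(x)
def pvLoopB (num : List Int) (total : Int) : Int :=
  match num with
  | [] => total
  | x :: rest => pvLoopB rest (if pvEhDivisor3 x then total + pvFatB x else total)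

def soma_fatoriais_alt (num : List Int) : Int := pvLoopB num 0

-- ===== PRECONDITION & SPEC =====
-- Pre_ excludes exactly the inputs on which the Python A hits CPython's recursion limit and raises
-- RecursionError: a negative multiple of 3 anywhere in the list (unbounded fatorial recursion), a
-- multiple of 3 large enough that fatorial's depth exceeds the limit, or a list long enough that
-- soma_fatoriais's own list recursion does; the bounds 130 and 200 keep the combined depth safely
-- below the default limit of 1000 (a narrowing from the exact, interpreter-dependent threshold).
def Pre_soma_fatoriais (num : List Int) : Prop :=
  num.length ≤ 130 ∧ ∀ x ∈ num, x % 3 = 0 → (0 ≤ x ∧ x ≤ 200)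
instance (num : List Int) : Decidable (Pre_soma_fatoriais num) := by
  unfold Pre_soma_fatoriais; infer_instance

def pvWitness_soma_fatoriais : List Int := [3, 4, 6, 1, 0]

def Spec_soma_fatoriais (num : List Int) (out : Int) : Prop := out = soma_fatoriais_alt num
instance (num : List Int) (out : Int) : Decidable (Spec_soma_fatoriais num out) := by
  unfold Spec_soma_fatoriais; infer_instance

-- ===== CLAIM (what is proved, stated in full; the proofs are below) =====
def Claim_equal_soma_fatoriais : Prop :=
  ∀ (num : List Int), Dom_soma_fatoriais num → Pre_soma_fatoriais num →
    Spec_soma_fatoriais num (soma_fatoriais num)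

-- ===== LEMMAS AND PROOFS =====

-- the two factorials agree on nonnegative inputs
lemma pvFatB_eq_pvFatA (n : Int) (hn : 0 ≤ n) : pvFatB n = pvFatA n := by
  obtain ⟨k, rfl⟩ := Int.eq_ofNat_of_zero_le hn
  induction k with
  | zero =>
    rw [pvFatB, PySem.List.pyRange_one_eq_nil (by omega)]
    rw [pvFatA]; simp
  | succ m ih =>
    by_cases hm : m = 0
    · subst hm
      rw [pvFatB, PySem.List.pyRange_one_eq_nil (by omega)]
      rw [pvFatA]; simp
      rw [pvFatA]; simp
    · have hcast : ((m + 1 : Nat) : Int) = (m : Int) + 1 := by push_cast; ring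
      rw [pvFatB, hcast, PySem.List.pyRange_one_succ_right (by omega), List.foldl_append]
      rw [pvFatB] at ih
      rw [ih (by omega), List.foldl_cons, List.foldl_nil]
      conv_rhs => rw [pvFatA]
      simp only [show ¬ ((m : Int) + 1 = 0) by omega, if_false,
                 show ¬ ((m : Int) + 1 < 0) by omega, if_false,
                 show (m : Int) + 1 - 1 = (m : Int) by ring]
      ring

-- loop invariant: B's loop accumulates A's recursive sum
lemma pvLoopB_eq (num : List Int) (total : Int)
    (h : ∀ x ∈ num, x % 3 = 0 → (0 ≤ x ∧ x ≤ 200)) :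
    pvLoopB num total = total + soma_fatoriais num := by
  induction num generalizing total with
  | nil => simp [pvLoopB, soma_fatoriais]
  | cons x rest ih =>
    have hrest : ∀ y ∈ rest, y % 3 = 0 → (0 ≤ y ∧ y ≤ 200) := fun y hy => h y (List.mem_cons_of_mem _ hy)
    rw [pvLoopB, soma_fatoriais]
    by_cases hd : pvEhDivisor3 x
    · have hx3 : x % 3 = 0 := by
        simpa [pvEhDivisor3, PySem.Int.mod_eq_emod_of_pos (by norm_num : (0:Int) < 3)] using hd
      have hx := h x (List.mem_cons_self ..) hx3
      rw [if_pos hd, if_pos hd, ih _ hrest, pvFatB_eq_pvFatA x hx.1]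
      ring
    · rw [if_neg hd, if_neg hd, ih _ hrest]

-- ===== VERDICT (by name: the statement is the Claim_ definition above) =====
theorem soma_fatoriais_spec : Claim_equal_soma_fatoriais := by
  intro num _ hpre
  unfold Spec_soma_fatoriais soma_fatoriais_alt
  rw [pvLoopB_eq num 0 hpre.2]
  ring
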